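-- pv_equiv track=rewrite | github.com/valefom/--PY1 | Лабораторная работа 4/task_1.py | remove_whitespace
-- ===== SOURCE A (Python) =====
-- def remove_whitespace(str_):
--     new_text = []
--     idx = []
--     s_prev = ''
--     for i, v in enumerate(str_):
--         if i > 0:
--             if(str_[i] == str_[i-1] and str_[i] == ' '):
--                 new_text.append('')
--                 #new_text.appen('')
--             else:
--                 new_text.append(str_[i])
--         else:
--             new_text.append(str_[i])
--     return ''.join(new_text)
-- ===== SOURCE B (Python) =====
-- def remove_whitespace(str_):
--     # Scan the string as maximal runs of equal characters: a run of spaces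
--     # contributes a single space, any other run is kept verbatim.
--     pieces = []
--     i = 0
--     n = len(str_)
--     while i < n:
--         c = str_[i]
--         j = i + 1
--         while j < n and str_[j] == c:
--             j += 1
--         pieces.append(' ' if c == ' ' else str_[i:j])
--         i = j
--     return ''.join(pieces)
-- ===== Notes on version B (the rewrite author's own statement) =====
-- stated objective: alternative
-- what changed: B scans the string as maximal runs of equal characters (inner while to find each run's end, emitting one space for a space run and the whole run otherwise), instead of A's enumerate loop comparing each character to its predecessor by index.
import Mathlib
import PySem

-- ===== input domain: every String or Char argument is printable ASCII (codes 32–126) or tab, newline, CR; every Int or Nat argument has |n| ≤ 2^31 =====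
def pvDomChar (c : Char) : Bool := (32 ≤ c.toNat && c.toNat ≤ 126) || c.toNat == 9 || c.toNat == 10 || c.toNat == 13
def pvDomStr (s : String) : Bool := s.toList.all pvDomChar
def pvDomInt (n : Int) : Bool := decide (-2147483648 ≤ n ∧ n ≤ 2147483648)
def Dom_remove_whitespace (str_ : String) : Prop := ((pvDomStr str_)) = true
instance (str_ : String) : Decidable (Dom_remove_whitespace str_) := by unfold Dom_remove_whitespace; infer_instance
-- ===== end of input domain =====

-- B re-implements the collapse of consecutive spaces by scanning maximal runs of equal
-- characters instead of A's index-based compare-to-previous loop (alternative structure).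


-- ===== PORT A =====
-- Pieces of new_text are '' or single characters, modelled as List Char; ''.join = flatten.
-- str_[i] / str_[i-1]: indices are always in range in A (enumerate indices, i > 0 before i-1),
-- so pyGetD with an arbitrary default is exact.
def remove_whitespace (str_ : String) : String :=
  let l := str_.toList
  let new_text : List (List Char) :=
    (PySem.List.enumerate l 0).foldl (fun acc iv =>
      if iv.1 > 0 then
        if PySem.List.pyGetD l iv.1 ' ' = PySem.List.pyGetD l (iv.1 - 1) ' ' ∧
           PySem.List.pyGetD l iv.1 ' ' = ' ' then
          acc ++ [([] : List Char)]
        else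
          acc ++ [[PySem.List.pyGetD l iv.1 ' ']]
      else
        acc ++ [[PySem.List.pyGetD l iv.1 ' ']]) []
  String.mk new_text.flatten

-- ===== PORT B =====
-- B's inner 'while j < n and str_[j] == c: j += 1' computes the maximal run of c:
-- run = c :: takeWhile (· == c) of the rest, and 'i = j' drops exactly that prefix.
def pvRuns : List Char → List (List Char)
  | [] => []
  | c :: cs => (c :: cs.takeWhile (· == c)) :: pvRuns (cs.dropWhile (· == c))
  termination_by t => t.length
  decreasing_by
    simpa using Nat.lt_succ_of_le (List.length_dropWhile_le (· == c) cs)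

def remove_whitespace_alt (str_ : String) : String :=
  let pieces : List (List Char) :=
    (pvRuns str_.toList).map (fun r =>
      match r with
      | [] => []
      | c :: rest => if c = ' ' then [' '] else c :: rest)
  String.mk pieces.flatten

-- ===== PRECONDITION & SPEC =====
def Spec_remove_whitespace (str_ : String) (out : String) : Prop := out = remove_whitespace_alt str_
instance (str_ : String) (out : String) : Decidable (Spec_remove_whitespace str_ out) := by unfold Spec_remove_whitespace; infer_instance

-- ===== CLAIM (what is proved, stated in full; the proofs are below) =====
def Claim_equal_remove_whitespace : Prop := ∀ (str_ : String), Dom_remove_whitespace str_ → Spec_remove_whitespace str_ (remove_whitespace str_)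

-- ===== LEMMAS AND PROOFS =====

-- Canonical form: first char kept, then each char kept unless it equals the previous one and is ' '.
def pvKeep : Char → List Char → List Char
  | _, [] => []
  | p, c :: t => if c = p ∧ c = ' ' then pvKeep c t else c :: pvKeep c t

def pvCanon : List Char → List Char
  | [] => []
  | c :: t => c :: pvKeep c t

-- A's per-element piece, as a function of the enumerate entry.
def pvPieceA (l : List Char) (iv : Int × Char) : List Char :=
  if iv.1 > 0 then
    if PySem.List.pyGetD l iv.1 ' ' = PySem.List.pyGetD l (iv.1 - 1) ' ' ∧
       PySem.List.pyGetD l iv.1 ' ' = ' ' then [] else [PySem.List.pyGetD l iv.1 ' ']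
  else [PySem.List.pyGetD l iv.1 ' ']

lemma pvFoldA (l : List Char) (acc : List (List Char)) (t : List (Int × Char)) :
    t.foldl (fun acc iv =>
      if iv.1 > 0 then
        if PySem.List.pyGetD l iv.1 ' ' = PySem.List.pyGetD l (iv.1 - 1) ' ' ∧
           PySem.List.pyGetD l iv.1 ' ' = ' ' then
          acc ++ [([] : List Char)]
        else
          acc ++ [[PySem.List.pyGetD l iv.1 ' ']]
      else
        acc ++ [[PySem.List.pyGetD l iv.1 ' ']]) acc = acc ++ t.map (pvPieceA l) := by
  have h : (fun (acc : List (List Char)) (iv : Int × Char) =>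
      if iv.1 > 0 then
        if PySem.List.pyGetD l iv.1 ' ' = PySem.List.pyGetD l (iv.1 - 1) ' ' ∧
           PySem.List.pyGetD l iv.1 ' ' = ' ' then
          acc ++ [([] : List Char)]
        else
          acc ++ [[PySem.List.pyGetD l iv.1 ' ']]
      else
        acc ++ [[PySem.List.pyGetD l iv.1 ' ']]) =
      fun acc iv => acc ++ [pvPieceA l iv] := by
    funext acc iv
    unfold pvPieceA
    split_ifs <;> rfl
  rw [h, PySem.List.foldl_append_singleton_eq_map]

-- The tail of A's loop (indices ≥ s ≥ 1) produces pvKeep of the previous character.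
lemma pvLoopA (l : List Char) (t : List Char) (s : Nat) (hs : 0 < s) (hd : l.drop s = t) :
    ((PySem.List.enumerate t (s : Int)).map (pvPieceA l)).flatten =
      pvKeep (l.getD (s - 1) ' ') t := by
  induction t generalizing s with
  | nil => simp [PySem.List.enumerate_nil, pvKeep]
  | cons c t' ih =>
    have hget : l[s]? = some c := by
      have := congrArg (fun x => x[0]?) hd
      simpa [List.getElem?_drop] using this
    have hgetD : l.getD s ' ' = c := by simp [List.getD, hget]
    have hd' : l.drop (s + 1) = t' := by
      have := congrArg List.tail hd
      simpa [List.tail_drop] using this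
    rw [PySem.List.enumerate_cons]
    have hcast : ((s : Int) + 1) = ((s + 1 : Nat) : Int) := by push_cast; ring
    rw [List.map_cons, List.flatten_cons, hcast, ih (s + 1) (by omega) hd']
    have hpiece : pvPieceA l ((s : Int), c) =
        (if c = l.getD (s - 1) ' ' ∧ c = ' ' then [] else [c]) := by
      unfold pvPieceA
      have h1 : ((s : Int)) > 0 := by exact_mod_cast hs
      have h2 : ((s : Int) - 1) = ((s - 1 : Nat) : Int) := by omega
      simp only [h1, if_true, h2, PySem.List.pyGetD_natCast, hgetD]
    rw [hpiece]
    have : l.getD (s + 1 - 1) ' ' = c := by simpa using hgetD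
    rw [this]
    rw [show pvKeep (l.getD (s - 1) ' ') (c :: t') =
        if c = l.getD (s - 1) ' ' ∧ c = ' ' then pvKeep c t' else c :: pvKeep c t' from rfl]
    split_ifs <;> simp

-- A computes the canonical form.
lemma pvA_canon (s : String) : remove_whitespace s = String.mk (pvCanon s.toList) := by
  show String.mk ((List.foldl _ [] (PySem.List.enumerate s.toList 0)).flatten) = _
  rw [pvFoldA]
  cases hl : s.toList with
  | nil => simp [PySem.List.enumerate_nil, pvCanon]
  | cons c t =>
    rw [PySem.List.enumerate_cons, List.map_cons, List.nil_append, List.flatten_cons]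
    have h0 : pvPieceA (c :: t) ((0 : Int), c) = [c] := by
      unfold pvPieceA; simp
    have h1 : ((0 : Int) + 1) = ((1 : Nat) : Int) := by norm_num
    rw [h0, h1, pvLoopA (c :: t) t 1 (by omega) (by simp)]
    simp [pvCanon]

-- Every character of takeWhile (· == p) equals p, and pvKeep treats such a prefix uniformly.
lemma pvKeep_prefix (p : Char) (u v : List Char) (hu : ∀ x ∈ u, x = p) :
    pvKeep p (u ++ v) = (if p = ' ' then [] else u) ++ pvKeep p v := by
  induction u with
  | nil => simp
  | cons x u' ih =>
    have hx : x = p := hu x (by simp)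
    have hu' : ∀ y ∈ u', y = p := fun y hy => hu y (by simp [hy])
    subst hx
    by_cases hp : x = ' '
    · rw [List.cons_append,
        show pvKeep x (x :: (u' ++ v)) = pvKeep x (u' ++ v) from by simp [pvKeep, hp],
        ih hu', if_pos hp, if_pos hp]
    · simp [pvKeep, hp, ih hu']

-- B computes the canonical form.
lemma pvB_canon_aux (t : List Char) :
    ((pvRuns t).map (fun r =>
      match r with
      | [] => ([] : List Char)
      | c :: rest => if c = ' ' then [' '] else c :: rest)).flatten = pvCanon t := by
  induction t using pvRuns.induct with
  | case1 => simp [pvRuns, pvCanon]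
  | case2 c cs ih =>
    rw [pvRuns]
    simp only [List.map_cons, List.flatten_cons, ih]
    have hsplit : cs = cs.takeWhile (· == c) ++ cs.dropWhile (· == c) :=
      (List.takeWhile_append_dropWhile).symm
    have hu : ∀ x ∈ cs.takeWhile (· == c), x = c := by
      intro x hx
      have := List.mem_takeWhile_imp hx
      simpa using this
    have hkeep : pvKeep c cs =
        (if c = ' ' then [] else cs.takeWhile (· == c)) ++ pvKeep c (cs.dropWhile (· == c)) := by
      conv_lhs => rw [hsplit]
      exact pvKeep_prefix c _ _ hu
    have htail : pvKeep c (cs.dropWhile (· == c)) = pvCanon (cs.dropWhile (· == c)) := by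
      cases hdw : cs.dropWhile (· == c) with
      | nil => simp [pvKeep, pvCanon]
      | cons d ds =>
        have hdc : ¬ (d == c) = true := by
          have := List.head_dropWhile_not (· == c) (l := cs)
          rw [hdw] at this
          simpa using this (by simp)
        have hdc' : d ≠ c := by simpa using hdc
        simp only [pvKeep, pvCanon]
        rw [if_neg (by tauto)]
    rw [show pvCanon (c :: cs) = c :: pvKeep c cs from rfl, hkeep, htail]
    by_cases hc : c = ' '
    · simp [hc]
    · simp [hc]

lemma pvB_canon (s : String) : remove_whitespace_alt s = String.mk (pvCanon s.toList) := by
  show String.mk ((List.map _ (pvRuns s.toList)).flatten) = _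
  rw [pvB_canon_aux]

-- ===== VERDICT (by name: the statement is the Claim_ definition above) =====
theorem remove_whitespace_spec : Claim_equal_remove_whitespace := by
  intro s _
  unfold Spec_remove_whitespace
  rw [pvA_canon, pvB_canon]
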